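-- pv_equiv track=rewrite | github.com/aws/aws-sdk-pandas | tests/utils.py | calc_bounders
-- ===== SOURCE A (Python) =====
-- def calc_bounders(num, cpus):
--     cpus = num if num < cpus else cpus
--     size = int(num / cpus)
--     rest = num % cpus
--     bounders = []
--     end = -1
--     for _ in range(cpus):
--         start = end + 1
--         end += size
--         if rest:
--             end += 1
--             rest -= 1
--         bounders.append((start, end))
--     return bounders
-- ===== SOURCE B (Python) =====
-- def calc_bounders(num, cpus):
--     cpus = num if num < cpus else cpus
--     size = int(num / cpus)
--     rest = num % cpus
--     return [
--         (i * size + min(i, rest), (i + 1) * size + min(i + 1, rest) - 1)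
--         for i in range(cpus)
--     ]
-- ===== Notes on version B (the rewrite author's own statement) =====
-- stated objective: simpler
-- what changed: Replaces A's running end/rest accumulator loop with a list comprehension that computes each (start, end) pair in closed form from the index.
import Mathlib
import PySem

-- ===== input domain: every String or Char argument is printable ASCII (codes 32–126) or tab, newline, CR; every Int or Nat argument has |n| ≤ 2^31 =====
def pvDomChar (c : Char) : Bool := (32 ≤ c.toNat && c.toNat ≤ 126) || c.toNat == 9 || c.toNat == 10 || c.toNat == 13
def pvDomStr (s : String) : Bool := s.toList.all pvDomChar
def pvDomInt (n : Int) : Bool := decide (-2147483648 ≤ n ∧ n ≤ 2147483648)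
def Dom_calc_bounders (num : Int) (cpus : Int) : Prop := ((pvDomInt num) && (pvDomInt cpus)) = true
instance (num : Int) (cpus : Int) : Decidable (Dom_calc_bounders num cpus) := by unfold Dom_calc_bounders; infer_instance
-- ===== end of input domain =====

-- B computes each (start, end) pair in closed form by a comprehension instead of A's running accumulator.

-- ===== PORT A =====
-- The loop body of A, as a named helper: state is (bounders, end, rest).
def calcStep (size : Int) (st : List (Int × Int) × Int × Int) (_ : Int) : List (Int × Int) × Int × Int :=
  let start := st.2.1 + 1
  let e := st.2.1 + size
  let er := if st.2.2 ≠ 0 then (e + 1, st.2.2 - 1) else (e, st.2.2)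
  (st.1 ++ [(start, er.1)], er.1, er.2)

-- Python's `int(num / cpus)` (float division then truncation) is exactly truncation-division
-- Int.tdiv on the stated domain |num|, |cpus| ≤ 2^31: the correctly-rounded float quotient has
-- relative error < 2^-52, so with |num| ≤ 2^31 < 2^52/cpus truncating it never crosses an integer.
def calc_bounders (num : Int) (cpus : Int) : List (Int × Int) :=
  let cpus := if num < cpus then num else cpus
  let size := Int.tdiv num cpus
  let rest := PySem.Int.mod num cpus
  ((PySem.List.pyRange 0 cpus 1).foldl (calcStep size) ([], -1, rest)).1

-- ===== PORT B =====
def calc_bounders_alt (num : Int) (cpus : Int) : List (Int × Int) :=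
  let cpus := if num < cpus then num else cpus
  let size := Int.tdiv num cpus
  let rest := PySem.Int.mod num cpus
  (PySem.List.pyRange 0 cpus 1).map (fun i =>
    (i * size + min i rest, (i + 1) * size + min (i + 1) rest - 1))

-- ===== PRECONDITION & SPEC =====
-- Pre_ excludes exactly the inputs where Python A raises ZeroDivisionError:
-- after the guard, the effective cpu count min num cpus is 0 (B raises there too).
def Pre_calc_bounders (num : Int) (cpus : Int) : Prop := min num cpus ≠ 0
instance (num : Int) (cpus : Int) : Decidable (Pre_calc_bounders num cpus) := by unfold Pre_calc_bounders; infer_instance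
def pvWitness_calc_bounders : Int × Int := (10, 3)

def Spec_calc_bounders (num : Int) (cpus : Int) (out : List (Int × Int)) : Prop := out = calc_bounders_alt num cpus
instance (num : Int) (cpus : Int) (out : List (Int × Int)) : Decidable (Spec_calc_bounders num cpus out) := by unfold Spec_calc_bounders; infer_instance

-- ===== CLAIM (what is proved, stated in full; the proofs are below) =====
def Claim_equal_calc_bounders : Prop := ∀ (num : Int) (cpus : Int), Dom_calc_bounders num cpus → Pre_calc_bounders num cpus → Spec_calc_bounders num cpus (calc_bounders num cpus)

-- ===== LEMMAS AND PROOFS =====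

-- One loop iteration at index j, starting from the invariant state.
theorem calcStep_eval (size rest : Int) (j : Int)
    (acc : List (Int × Int)) :
    calcStep size (acc, j * size + min j rest - 1, rest - min j rest) j
      = (acc ++ [(j * size + min j rest, (j + 1) * size + min (j + 1) rest - 1)],
         (j + 1) * size + min (j + 1) rest - 1, rest - min (j + 1) rest) := by
  by_cases hjr : j < rest
  · have h1 : min j rest = j := by omega
    have h2 : min (j + 1) rest = j + 1 := by omega
    simp only [calcStep, h1, h2]
    rw [if_pos (by omega : rest - j ≠ 0)]
    rw [show j * size + j - 1 + 1 = j * size + j from by ring,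
        show j * size + j - 1 + size + 1 = (j + 1) * size + (j + 1) - 1 from by ring,
        show rest - j - 1 = rest - (j + 1) from by ring]
  · have h1 : min j rest = rest := by omega
    have h2 : min (j + 1) rest = rest := by omega
    simp only [calcStep, h1, h2]
    rw [if_neg (by omega : ¬ rest - rest ≠ 0)]
    rw [show j * size + rest - 1 + 1 = j * size + rest from by ring,
        show j * size + rest - 1 + size = (j + 1) * size + rest - 1 from by ring]

-- The loop invariant: after processing indices < j, A's state is
-- (first j pairs, j*size + min j rest - 1, rest - min j rest).
theorem calc_bounders_loop (size rest c : Int) :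
    ∀ (n : Nat) (j : Int), (c - j).toNat = n → 0 ≤ j → ∀ (acc : List (Int × Int)),
    ((PySem.List.pyRange j c 1).foldl (calcStep size)
        (acc, j * size + min j rest - 1, rest - min j rest)).1
      = acc ++ (PySem.List.pyRange j c 1).map (fun i =>
          (i * size + min i rest, (i + 1) * size + min (i + 1) rest - 1)) := by
  intro n
  induction n with
  | zero =>
    intro j hn hj acc
    rw [PySem.List.pyRange_one (a := j) (b := c)]
    simp [hn]
  | succ n ih =>
    intro j hn hj acc
    by_cases h : j < c
    · rw [PySem.List.pyRange_one_cons h]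
      simp only [List.foldl_cons, List.map_cons]
      rw [calcStep_eval size rest j acc]
      rw [ih (j + 1) (by omega) (by omega)]
      simp
    · rw [PySem.List.pyRange_one (a := j) (b := c)]
      have h0 : (c - j).toNat = 0 := by omega
      simp [h0]

-- ===== VERDICT (by name: the statement is the Claim_ definition above) =====
theorem calc_bounders_spec : Claim_equal_calc_bounders := by
  intro num cpus _ hpre
  unfold Spec_calc_bounders calc_bounders calc_bounders_alt
  set c := if num < cpus then num else cpus with hc
  by_cases hcpos : 0 < c
  · have hr : 0 ≤ PySem.Int.mod num c := PySem.Int.mod_nonneg num hcpos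
    have h0 : min 0 (PySem.Int.mod num c) = 0 := min_eq_left hr
    have := calc_bounders_loop (Int.tdiv num c) (PySem.Int.mod num c) c
      (c - 0).toNat 0 rfl le_rfl []
    rw [h0] at this
    simpa using this
  · have hcz : c ≠ 0 := by
      unfold Pre_calc_bounders at hpre
      simp only [hc]
      split <;> omega
    have h0 : c.toNat = 0 := by omega
    simp [PySem.List.pyRange_one, h0]
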